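/- GENERATED by mk_final_copies.py from the proof of the farm's unit `start_decoder.C6c` (farm:start_decoder.C6c.1: Lemmas.lean) as the
   re-elaboration sweep compiled it — do not edit. -/
import Asan.CheckWalk
import Vorbis.Spec.Units.start_decoder_C6c
import Vorbis.Spec.StartDecoderCarry
import Vorbis.Spec.StartDecoderC7

open X86 X86.User Asan Vorbis Vorbis.Spec Vorbis.Spec.StartDecoder

set_option maxRecDepth 100000
set_option maxHeartbeats 4000000

namespace Vorbis.Spec.start_decoder_C6c

/-- A window of the first half of segment C6c: the stack below the steady rsp (the pushed return addresses of the check calls and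
of `error`, their frames), the pointer field at offset `o` of the struct `cb(i)` at `c` (`o = 8`: `codeword_lengths`), `f->eof` /
`f->error` `[f + 136, f + 144)`. -/
def C6cWin (g : Ghost) (c o : Nat) (w : Span) : Prop :=
  (g.R - 408 ≤ w.lo ∧ w.hi ≤ g.R) ∨ (c + o ≤ w.lo ∧ w.hi ≤ c + o + 8) ∨ (g.f + 136 ≤ w.lo ∧ w.hi ≤ g.f + 144)

/-- **The invariant side of a segment that stores ONE pointer field of the struct `cb(i)`** (the twin of `c6b_carry` of
farm/worked/start_decoder.C6b, here used with `o = 8`): from `Frame` and CUR(i) at `v` and a later state `s` whose memory differs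
from `v.mem` only in windows `C6cWin` (no shadow byte): `Frame` at the new program counter, CUR(i), `cb(i)` unmoved, and the
struct's bytes before and after the field are kept. -/
theorem c6c_carry {u₀ : State} {g : Ghost} {pc pc' : Word} {i : Nat} {A2 A3 Ai : Arena} {A : Arena × List Obj} {v s : State}
    {ws : List Span} (o : Nat) (ho : o + 8 ≤ 2120) (hfr : Frame u₀ g pc A v) (hcur : Cur g i A2 A3 Ai A v)
    (hs : Mem.SameExcept ws v.mem s.mem) (hun : ShadowUntouched v.mem s.mem)
    (hok : ∀ w, w ∈ ws → C6cWin g (g.cb v.mem i) o w)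
    (hrip : s.rip = pc') (hrsp : s.reg .rsp = v.reg .rsp) (hcode : CodeOK u₀ s.mem) (hinv : abiInv s)
    (hr14 : s.reg .r14 = v.reg .r14) :
    Frame u₀ g pc' A s ∧ Cur g i A2 A3 Ai A s ∧ g.cb s.mem i = g.cb v.mem i ∧
      (⟨g.cb v.mem i, o⟩ : Block).Kept v.mem s.mem ∧ (⟨g.cb v.mem i + o + 8, 2120 - o - 8⟩ : Block).Kept v.mem s.mem := by
  have hpos : Pos g A := Pos.of hfr hcur
  have hm0 : MInv g i A2 A3 Ai A v.mem := MInv.of hfr hcur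
  have hcw := hm0.c_where
  have p1 := hpos.r_eq
  have p2 := hpos.ra_lo
  have p3 := hpos.ra_hi
  have p4 := hpos.f_lo
  have p5 := hpos.f_hi
  have p6 := hpos.f_stack
  have p7 := hpos.objOut
  have p9 := hpos.ar_lo
  have p10 := hpos.ar_hi
  have p11 := hpos.ar_stack
  have hok0 : ∀ w, w ∈ ws → OkWin g Ai A (g.cb v.mem i) w := by
    intro w hw
    have k := hok w hw
    unfold C6cWin at k
    left
    unfold OkWin0
    omega
  have hb : Bits (g.Blk A) g.len s.mem g.f := by
    apply bits_kept hpos hcur.sd.bits hs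
    intro w hw
    have k := hok w hw
    unfold C6cWin at k
    omega
  have hfr' := Frame.step hfr hcur hs hun hok0 hb hrip hrsp hcode hinv
  obtain ⟨hcur', hcb⟩ := Cur.step hfr hcur hs hun hok0 hb hr14
  refine ⟨hfr', hcur', hcb, ?_, ?_⟩
  · apply Block.Kept.of_sameExcept hs _ (by simp only []; omega)
    intro w hw
    have k := hok w hw
    unfold C6cWin at k
    simp only []
    omega
  · apply Block.Kept.of_sameExcept hs _ (by simp only []; omega)
    intro w hw
    have k := hok w hw
    unfold C6cWin at k
    simp only []
    omega

/-- **The fields of the book that the store `c->codeword_lengths = p` does not touch** read the same (the bytes `[c, c + 8)` and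
`[c + 16, c + 2120)` are kept). -/
theorem c6c_fields {m m' : Mem} {c : Nat} (hlo : (⟨c, 8⟩ : Block).Kept m m')
    (hhi : (⟨c + 8 + 8, 2120 - 8 - 8⟩ : Block).Kept m m') :
    Codebook.dimensions m' c = Codebook.dimensions m c ∧ Codebook.entries m' c = Codebook.entries m c ∧
      Codebook.sparse m' c = Codebook.sparse m c ∧
      Codebook.sorted_entries m' c = Codebook.sorted_entries m c ∧
      (Fresh5 m c → Fresh5 m' c) := by
  have e_dim : Codebook.dimensions m' c = Codebook.dimensions m c := by
    simp only [vacc, voff]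
    exact hlo.i32 _ (by simp only []; omega) (by simp only []; omega)
  have e_ent : Codebook.entries m' c = Codebook.entries m c := by
    simp only [vacc, voff]
    exact hlo.i32 _ (by simp only []; omega) (by simp only []; omega)
  have e_sp : Codebook.sparse m' c = Codebook.sparse m c := by
    simp only [vacc, voff]
    exact hhi.u8 _ (by simp only []; omega) (by simp only []; omega)
  have e_lt : Codebook.lookup_type m' c = Codebook.lookup_type m c := by
    simp only [vacc, voff]
    exact hhi.u8 _ (by simp only []; omega) (by simp only []; omega)
  have e_lv : Codebook.lookup_values m' c = Codebook.lookup_values m c := by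
    simp only [vacc, voff]
    exact hhi.u32 _ (by simp only []; omega) (by simp only []; omega)
  have e_mu : Codebook.multiplicands m' c = Codebook.multiplicands m c := by
    simp only [vacc, voff]
    exact hhi.u64 _ (by simp only []; omega) (by simp only []; omega)
  have e_sc : Codebook.sorted_codewords m' c = Codebook.sorted_codewords m c := by
    simp only [vacc, voff]
    exact hhi.u64 _ (by simp only []; omega) (by simp only []; omega)
  have e_sv : Codebook.sorted_values m' c = Codebook.sorted_values m c := by
    simp only [vacc, voff]
    exact hhi.u64 _ (by simp only []; omega) (by simp only []; omega)
  have e_se : Codebook.sorted_entries m' c = Codebook.sorted_entries m c := by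
    simp only [vacc, voff]
    exact hhi.i32 _ (by simp only []; omega) (by simp only []; omega)
  refine ⟨e_dim, e_ent, e_sp, e_se, ?_⟩
  intro fr
  exact
    { lookup_type := by rw [e_lt]; exact fr.lookup_type
      lookup_values := by rw [e_lv]; exact fr.lookup_values
      multiplicands := by rw [e_mu]; exact fr.multiplicands
      sorted_codewords := by rw [e_sc]; exact fr.sorted_codewords
      sorted_values := by rw [e_sv]; exact fr.sorted_values }

/-- **`InC6Mid` over an allocator call** (`c6a_mid` of farm/worked/start_decoder.C6a for ANY snapshot `Aw`): from `InC6Mid` at the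
state `s` before the call (ghost `A`) and the results of the allocator lemma at the returned state `w` (ghost `A'`): `InC6Mid` at
`w`, the struct's fields unchanged. `hlen`: the bytes of `lengths` (the temp block P1) are kept. -/
theorem c6c_mid {u₀ : State} {g : Ghost} {i : Nat} {A2 A3 Ai Aw : Arena} {A A' : Arena × List Obj} {lengths : Nat}
    {pc pc' : Word} {s w : State} (h : InC6Mid u₀ g i A2 A3 Ai Aw A lengths pc s) (hF : Frame u₀ g pc' A' w)
    (hC : Cur g i A2 A3 Ai A' w) (hcb : g.cb w.mem i = g.cb s.mem i) (hkept : AllKept A.1.Blk s.mem w.mem)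
    (hext : A.1.Extends A'.1) (hrbx : w.reg .rbx = s.reg .rbx)
    (hlen : (Block.mk lengths (Codebook.entries s.mem (g.cb s.mem i)).toNat).Kept s.mem w.mem) :
    InC6Mid u₀ g i A2 A3 Ai Aw A' lengths pc' w ∧ Codebook.SameFields s.mem w.mem (g.cb s.mem i) := by
  have hcbOK := h.cur.ages.cbOK
  have hkI : AllKept Ai.Blk s.mem w.mem := fun B hB => hkept B (hB.mono h.cur.ages.exti)
  have hstruct : (Codebook.block (g.cb s.mem i)).Kept s.mem w.mem := hcbOK.cb_kept (hkI _ hcbOK.F2) i h.cur.lt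
  have e := Codebook.SameFields.of_kept hstruct
  have hlenE := hlen.same
  have hlenI := hlen.inside
  simp only [vblock] at hlenE hlenI
  have hf := h.fresh
  refine ⟨?_, e⟩
  exact
    { frame := hF
      cur := hC
      extw := h.extw
      extw' := h.extw'.trans hext
      k1 := by rw [hcb]; exact h.k1.frame e
      k2 := by rw [hcb]; exact h.k2.frame e
      rbx := by rw [hrbx]; exact h.rbx
      lenL := by rw [hcb, e.entries]; exact h.lenL.same hlenE hlenI
      fresh := by
        rw [hcb]
        exact ⟨⟨by rw [e.lookup_type]; exact hf.lookup_type, by rw [e.lookup_values]; exact hf.lookup_values,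
          by rw [e.multiplicands]; exact hf.multiplicands⟩, by rw [e.sorted_codewords]; exact hf.sorted_codewords,
          by rw [e.sorted_values]; exact hf.sorted_values⟩ }

/-- **`InC6d` (@cut131) from the return of `setup_temp_malloc(f, 4·SE)`**, both arms: `hres` is the allocator's result in the
form of `InC6d.res` over the memory of the state `s` before the call. -/
theorem c6c_build {u₀ : State} {g : Ghost} {i : Nat} {A2 A3 Ai Aw : Arena} {A A' : Arena × List Obj} {lengths : Nat}
    {pc : Word} {s w : State} (h : InC6Mid u₀ g i A2 A3 Ai Aw A lengths pc s)
    (sparse1 : Codebook.sparse s.mem (g.cb s.mem i) = 1)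
    (sl : Since Aw A.1
      ⟨Codebook.codeword_lengths s.mem (g.cb s.mem i), (Codebook.sorted_entries s.mem (g.cb s.mem i)).toNat⟩)
    (cnt : CNT s.mem lengths (g.cb s.mem i))
    (hF : Frame u₀ g L.start_decoder.cut131 A' w) (hC : Cur g i A2 A3 Ai A' w)
    (hcb : g.cb w.mem i = g.cb s.mem i) (hkept : AllKept A.1.Blk s.mem w.mem) (hext : A.1.Extends A'.1)
    (hrbx : w.reg .rbx = s.reg .rbx)
    (hlen : (Block.mk lengths (Codebook.entries s.mem (g.cb s.mem i)).toNat).Kept s.mem w.mem)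
    (hres : w.reg .rax = 0 ∨ TempsAre A'.1
      [((w.reg .rax).toNat, 4 * (Codebook.sorted_entries s.mem (g.cb s.mem i)).toNat),
       (lengths, (Codebook.entries s.mem (g.cb s.mem i)).toNat)]) :
    InC6d u₀ g i A2 A3 Ai Aw A' lengths w := by
  obtain ⟨hmid, e⟩ := c6c_mid h hF hC hcb hkept hext hrbx hlen
  have hlenE := hlen.same
  have hlenI := hlen.inside
  simp only [vblock] at hlenE hlenI
  exact
    { mid := hmid
      sparse1 := by rw [hcb, e.sparse]; exact sparse1
      sparse_lengths := by rw [hcb, e.codeword_lengths, e.sorted_entries]; exact sl.mono hext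
      cnt := by
        rw [hcb]
        unfold CNT at cnt ⊢
        rw [e.entries, e.sorted_entries, C7.usedCount_same hlenE hlenI]
        exact cnt
      res := by rw [hcb, e.entries, e.sorted_entries]; exact hres }

/-- **Where `*f` is** (a stack object of stb_vorbis_open_memory, or an object of `A.2`): in the data space, and off the part of the
stack below the steady stack pointer `R`. -/
theorem c6c_obj_where {g : Ghost} {i : Nat} {A2 A3 Ai : Arena} {A : Arena × List Obj} {v : State} (h : Cur g i A2 A3 Ai A v)
    (hsh : ShadowInv A.2 g.frames' g.R v.mem) (hoff : ∀ o, o ∈ A.2 → L.textHi ≤ o.base) :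
    0x119d40 ≤ g.f ∧ g.f + 1808 ≤ 0xC00000 ∧ (g.R ≤ g.f ∨ g.f + 1808 ≤ 0x700000 ∨ 0x800000 ≤ g.f) := by
  have hl : LiveIn A.2 g.frames' g.f Off.sizeof.stb_vorbis := by
    apply h.hand.obj.mono
    intro o ho
    unfold Ghost.frames'
    rw [stackObjs_cons]
    rcases List.mem_append.mp ho with hs | ho'
    · exact List.mem_append_left _ (List.mem_append_right _ hs)
    · exact List.mem_append_right _ ho'
  have hw := hl.where_ hsh hoff (by simp only [voff]; omega)
  simp only [voff] at hw
  exact hw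

/-- **`setup_temp_malloc`'s precondition at 0x11492b** (`ArenaPre`, as `setup_malloc`'s): the state `s` at the callee's entry has the
memory of the state `v` but for the pushed return address below `R` (`hmem`), `rsp = R − 8`, `rdi = f`. -/
theorem c6c_temp_pre {u₀ : State} {g : Ghost} {i : Nat} {A2 A3 Ai : Arena} {A : Arena × List Obj} {pc : Word} {v s : State}
    (hfr : Frame u₀ g pc A v) (hcur : Cur g i A2 A3 Ai A v) (hun : ShadowUntouched v.mem s.mem)
    (hmem : Mem.EqOn (g.f + 112) (g.f + 136) v.mem s.mem) (hrsp : (s.reg .rsp).toNat + 8 = g.R)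
    (hrdi : (s.reg .rdi).toNat = g.f) : (setup_temp_malloc.spec A.2 g.frames' A.1).pre s := by
  have hob := hcur.sd.bits.OB1
  obtain ⟨hf1, hf2, _⟩ := c6c_obj_where hcur hfr.shadow hfr.offText
  refine ⟨⟨?_, hfr.offText⟩, ?_, ?_, hcur.hand.arenaText⟩
  · rw [hrsp]
    exact hfr.shadow.untouched hun
  · rw [hrdi]
    exact hcur.sd.env.live _ hob
  · rw [hrdi]
    apply hcur.sd.arena.frame (by simp only [voff]; omega)
    simp only [voff]
    exact hmem

/-- The walker's form of `lea esi, [rax*4]` for a value below 2^30. -/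
theorem c6c_lea4 (x : BitVec 32) (h : x.toNat < 2 ^ 30) :
    (Word.ofBV (BitVec.setWidth 32 (Word.ofBV x * 4).toBitVec)).toNat = 4 * x.toNat := by
  have e4 : (4 : Word).toNat = 4 := rfl
  rw [toNat_ofBV32, BitVec.toNat_setWidth, UInt64.toNat_toBitVec, UInt64.toNat_mul, toNat_ofBV32, e4]
  omega

/-- **The shadow window of `setup_temp_malloc`'s footprint is a window of the arena's shadow** (the fourth alternative of
`AllocWin`), when the request fits: the twin of `shadow_win_of_fits` for a temp block. -/
theorem c6c_shadow_win {A : Arena} {others : List Obj} {m : Mem} {f n : Nat} (ha : ArenaOK A others m f) (hfit : A.Fits n) :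
    0xC00000 + A.B / 8 ≤ (shadowSpan (A.B + (A.T - (r8 n + 32))) (A.B + (A.T - (r8 n + 32)) + n)).lo ∧
      (shadowSpan (A.B + (A.T - (r8 n + 32))) (A.B + (A.T - (r8 n + 32)) + n)).hi ≤ 0xC00000 + (A.B + A.L + 7) / 8 := by
  have h2 := ha.AR2
  have hl := le_r8 n
  unfold Arena.Fits at hfit
  simp only [shadowSpan]
  omega

/-- **A WHOLE `call setup_temp_malloc` THAT SUCCEEDS, in the walker's terms** (the twin of `Cur.alloc_call`, through `Cur.free`):
`v` = the state before the call instruction (its `Frame`, `Cur`), `s` = the state at the callee's entry (`hmem`: the pushed return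
address), `sr` = the returned state; `hs` = `w_same` after `simp only [X86.User.Spec.footprint, vspec] at w_same`; `hpost` =
`w_post`. Gives `Frame` and CUR(i) at `sr` for the ghost `(A.1.pushTemp n, A.1.newTempObj n :: A.2)`, `cb(i)` unmoved, every setup
block kept, rax = the new temp block's address. -/
theorem c6c_temp_call {u₀ : State} {g : Ghost} {pc pc' : Word} {i : Nat} {A2 A3 Ai : Arena} {A : Arena × List Obj}
    {v s sr : State} {a : Word} {x : Nat} (h : Frame u₀ g pc A v) (hc : Cur g i A2 A3 Ai A v)
    (hmem : s.mem = v.mem.writeLE a 8 x) (ha : a.toNat + 8 = g.R) (hsp : (s.reg .rsp).toNat + 8 = g.R)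
    (hrdi : (s.reg .rdi).toNat = g.f)
    (hs : Mem.SameExcept [⟨(s.reg .rsp).toNat - 80, (s.reg .rsp).toNat⟩,
      ⟨(s.reg .rdi).toNat + 132, (s.reg .rdi).toNat + 136⟩,
      shadowSpan (A.1.B + (A.1.T - (r8 ((s.reg .rsi).toNat % 2 ^ 32) + 32)))
        (A.1.B + (A.1.T - (r8 ((s.reg .rsi).toNat % 2 ^ 32) + 32)) + (s.reg .rsi).toNat % 2 ^ 32)] s.mem sr.mem)
    (hpost : (setup_temp_malloc.spec A.2 g.frames' A.1).post s sr) (hfit : A.1.Fits ((s.reg .rsi).toNat % 2 ^ 32))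
    (hrip : sr.rip = pc') (hrsp : sr.reg .rsp = v.reg .rsp) (hcode : CodeOK u₀ sr.mem) (hinv : abiInv sr)
    (hr14 : sr.reg .r14 = v.reg .r14) :
    Frame u₀ g pc' (A.1.pushTemp ((s.reg .rsi).toNat % 2 ^ 32), A.1.newTempObj ((s.reg .rsi).toNat % 2 ^ 32) :: A.2) sr ∧
      Cur g i A2 A3 Ai (A.1.pushTemp ((s.reg .rsi).toNat % 2 ^ 32), A.1.newTempObj ((s.reg .rsi).toNat % 2 ^ 32) :: A.2) sr ∧
      g.cb sr.mem i = g.cb v.mem i ∧ AllKept A.1.Blk v.mem sr.mem ∧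
      (sr.reg .rax).toNat = A.1.B + (A.1.T - (r8 ((s.reg .rsi).toNat % 2 ^ 32) + 32)) := by
  obtain ⟨hrax, ha', hsh'⟩ := hpost.1 hfit
  rw [hrdi] at ha'
  rw [hsp] at hsh'
  generalize (s.reg .rsi).toNat % 2 ^ 32 = n at *
  have hpos := Pos.of h hc
  have p1 := hpos.r_eq
  have p2 := hpos.ra_hi
  have p3 := hpos.ra_lo
  have hsub := c6c_shadow_win hc.sd.arena hfit
  -- the push and the callee's footprint as ONE footprint over `v.mem`, every window an `AllocWin`
  have hall : Mem.SameExcept [⟨g.R - 88, g.R⟩, ⟨g.f + 132, g.f + 136⟩,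
      shadowSpan (A.1.B + (A.1.T - (r8 n + 32))) (A.1.B + (A.1.T - (r8 n + 32)) + n)] v.mem sr.mem := by
    refine Mem.SameExcept.trans (ν := s.mem) ?_ ?_
    · rw [hmem]
      apply Mem.SameExcept.writeLE
      · omega
      · refine ⟨_, List.mem_cons_self, ?_, ?_⟩
        · simp only []
          omega
        · simp only []
          omega
    · apply hs.mono
      intro w hw b h1 h2
      simp only [List.mem_cons, List.mem_nil_iff, or_false] at hw
      rcases hw with rfl | rfl | rfl
      · simp only [] at h1 h2
        exact ⟨_, List.mem_cons_self, by simp only []; omega, by simp only []; omega⟩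
      · simp only [] at h1 h2
        exact ⟨_, List.mem_cons_of_mem _ List.mem_cons_self, by simp only []; omega, by simp only []; omega⟩
      · exact ⟨_, List.mem_cons_of_mem _ (List.mem_cons_of_mem _ List.mem_cons_self), h1, h2⟩
  have hok : ∀ w, w ∈ [(⟨g.R - 88, g.R⟩ : Span), ⟨g.f + 132, g.f + 136⟩,
      shadowSpan (A.1.B + (A.1.T - (r8 n + 32))) (A.1.B + (A.1.T - (r8 n + 32)) + n)] → AllocWin g A w := by
    intro w hw
    simp only [List.mem_cons, List.mem_nil_iff, or_false] at hw
    unfold AllocWin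
    rcases hw with rfl | rfl | rfl
    · left
      simp only []
      omega
    · right
      right
      left
      simp only []
      omega
    · right
      right
      right
      exact hsub
  have hext := A.1.extends_pushTemp n
  have hand' : g.Hand (A.1.pushTemp n, A.1.newTempObj n :: A.2) :=
    HandOK.mono hc.hand hext (fun o ho => List.mem_cons_of_mem _ ho)
  have hx : BlkLive (listBlk g.extra) (g.Live (A.1.pushTemp n, A.1.newTempObj n :: A.2)) := by
    have hl : BlkLive (listBlk g.extra) (g.Live A) := hc.sd.env.live.sub (fun B hB => runBlk_extra hB)
    refine hl.mono (fun x hx => ?_)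
    obtain ⟨o, ho, hb⟩ := hx
    refine ⟨o, ?_, hb⟩
    rcases List.mem_append.mp ho with hst | hoth
    · exact List.mem_append_left _ hst
    · exact List.mem_append_right _ (List.mem_cons_of_mem _ hoth)
  have hoff' : ∀ o, o ∈ A.1.newTempObj n :: A.2 → L.textHi ≤ o.base := by
    intro o ho
    rcases List.mem_cons.mp ho with rfl | hold
    · have ht := hc.hand.arenaText
      show L.textHi ≤ A.1.B + (A.1.T - (r8 n + 32))
      omega
    · exact h.offText o hold
  obtain ⟨r1, r2, r3, r4⟩ := Cur.free (A' := (A.1.pushTemp n, A.1.newTempObj n :: A.2)) h hc hall hok hext ha' hsh' hand' hx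
    hoff' hrip hrsp hcode hinv hr14
  exact ⟨r1, r2, r3, r4, hrax⟩

/-- **A WHOLE `call setup_temp_malloc` THAT FAILS** (`¬ A.1.Fits n`: rax = 0, the arena and the shadow as they were, nothing
written but the callee's stack frame): `Frame` and CUR(i) at the returned state for the SAME ghost. Arguments as
`c6c_temp_call`. -/
theorem c6c_temp_fail {u₀ : State} {g : Ghost} {pc pc' : Word} {i : Nat} {A2 A3 Ai : Arena} {A : Arena × List Obj}
    {v s sr : State} {a : Word} {x : Nat} (h : Frame u₀ g pc A v) (hc : Cur g i A2 A3 Ai A v)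
    (hmem : s.mem = v.mem.writeLE a 8 x) (ha : a.toNat + 8 = g.R) (hsp : (s.reg .rsp).toNat + 8 = g.R)
    (hrdi : (s.reg .rdi).toNat = g.f)
    (hpost : (setup_temp_malloc.spec A.2 g.frames' A.1).post s sr) (hfit : ¬ A.1.Fits ((s.reg .rsi).toNat % 2 ^ 32))
    (hrip : sr.rip = pc') (hrsp : sr.reg .rsp = v.reg .rsp) (hcode : CodeOK u₀ sr.mem) (hinv : abiInv sr)
    (hr14 : sr.reg .r14 = v.reg .r14) :
    Frame u₀ g pc' A sr ∧ Cur g i A2 A3 Ai A sr ∧ g.cb sr.mem i = g.cb v.mem i ∧ AllKept A.1.Blk v.mem sr.mem ∧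
      sr.reg .rax = 0 ∧ Mem.SameExcept [⟨g.R - 88, g.R⟩] v.mem sr.mem := by
  obtain ⟨hrax, ha', hun, hfailSame⟩ := hpost.2 hfit
  rw [hrdi] at ha'
  have hpos := Pos.of h hc
  have p1 := hpos.r_eq
  have p2 := hpos.ra_hi
  have p3 := hpos.ra_lo
  have hun0 : ShadowUntouched v.mem s.mem := by
    rw [hmem]
    exact Mem.eqOn_writeLE v.mem a 8 x 0xC00000 0x200000 (by omega) (by omega)
  have hunAll : ShadowUntouched v.mem sr.mem := Mem.EqOn.trans hun0 hun
  have hsh' : ShadowInv A.2 g.frames' g.R sr.mem := h.shadow.untouched hunAll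
  have hx : BlkLive (listBlk g.extra) (g.Live A) := hc.sd.env.live.sub (fun B hB => runBlk_extra hB)
  have hall : Mem.SameExcept [⟨g.R - 88, g.R⟩] v.mem sr.mem := by
    refine Mem.SameExcept.trans (ν := s.mem) ?_ ?_
    · rw [hmem]
      apply Mem.SameExcept.writeLE
      · omega
      · refine ⟨_, List.mem_cons_self, ?_, ?_⟩
        · simp only []
          omega
        · simp only []
          omega
    · apply hfailSame.mono
      intro w hw b h1 h2
      rw [List.mem_singleton.mp hw] at h1 h2
      simp only [] at h1 h2
      exact ⟨_, List.mem_cons_self, by simp only []; omega, by simp only []; omega⟩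
  have hok : ∀ w, w ∈ [(⟨g.R - 88, g.R⟩ : Span)] → AllocWin g A w := by
    intro w hw
    rw [List.mem_singleton.mp hw]
    unfold AllocWin
    left
    simp only []
    omega
  obtain ⟨r1, r2, r3, r4⟩ := Cur.free h hc hall hok (Arena.Extends.refl _) ha' hsh' hc.hand hx h.offText hrip hrsp hcode
    hinv hr14
  exact ⟨r1, r2, r3, r4, hrax, hall⟩

/-- **The temp list after a successful `setup_temp_malloc(f, n)`**: the new block `(p, n)` FIRST, `p = B + (T − (r8 n + 32))` the
returned pointer (the post's first conjunct). -/
theorem c6c_temps_push {A : Arena} {n p q : Nat} {rest : List (Nat × Nat)} (h : TempsAre A rest)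
    (hp : p = A.B + (A.T - (r8 n + 32))) (hq : q = n) : TempsAre (A.pushTemp n) ((p, q) :: rest) := by
  unfold TempsAre at h ⊢
  obtain ⟨h1, h2⟩ := h
  simp only [varena]
  refine ⟨?_, ?_⟩
  · rw [h1, List.map_cons, hp, hq]
    simp only [Nat.add_sub_cancel_left]
  · intro b hb
    rcases List.mem_cons.mp hb with rfl | hold
    · simp only []
      omega
    · exact h2 b hold

end Vorbis.Spec.start_decoder_C6c
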